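-- pv_equiv track=rewrite | github.com/RadomirDuo/11_duplicates | duplicates.py | search_duplicates
-- ===== SOURCE A (Python) =====
-- from collections import defaultdict
--
-- def search_duplicates(file_list):
--     duplicate_list = []
--     counter_keys = defaultdict(list)
--     for file_info, path_file in file_list:
--         counter_keys[file_info].append(path_file)
--     intermediate_list = sorted(counter_keys.items())
--     for full_file_info in intermediate_list:
--         if len(full_file_info[1]) > 1:
--             duplicate_list.append(full_file_info)
--     return duplicate_list
-- ===== SOURCE B (Python) =====
-- def search_duplicates(file_list):
--     ordered = sorted(file_list, key=lambda pair: pair[0])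
--     result = []
--     i, n = 0, len(ordered)
--     while i < n:
--         key = ordered[i][0]
--         j = i + 1
--         while j < n and ordered[j][0] == key:
--             j += 1
--         if j - i > 1:
--             result.append((key, [path for _, path in ordered[i:j]]))
--         i = j
--     return result
-- ===== Notes on version B (the rewrite author's own statement) =====
-- stated objective: idiomatic
-- what changed: B replaces A's defaultdict grouping plus sort of the items by a stable sort of the whole list keyed on file_info followed by a single linear scan that slices out each equal-key run, so no dict is ever built.
import Mathlib
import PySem

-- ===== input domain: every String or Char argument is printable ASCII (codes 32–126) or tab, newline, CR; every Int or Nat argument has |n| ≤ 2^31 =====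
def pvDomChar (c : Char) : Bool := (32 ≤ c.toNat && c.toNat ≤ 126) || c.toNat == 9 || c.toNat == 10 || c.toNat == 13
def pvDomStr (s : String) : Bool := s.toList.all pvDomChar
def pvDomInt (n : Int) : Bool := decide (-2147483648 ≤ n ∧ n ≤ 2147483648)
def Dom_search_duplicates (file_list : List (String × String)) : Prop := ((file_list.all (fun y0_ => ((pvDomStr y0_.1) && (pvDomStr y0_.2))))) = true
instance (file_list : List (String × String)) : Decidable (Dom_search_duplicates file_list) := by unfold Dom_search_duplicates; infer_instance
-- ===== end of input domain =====

-- B groups duplicates by a stable sort on file_info plus one linear scan over equal-key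
-- runs instead of A's defaultdict followed by sorting the items (objective: idiomatic).

-- ===== PORT A =====
def search_duplicates (file_list : List (String × String)) : List (String × List String) :=
  -- counter_keys[file_info].append(path_file) over file_list (defaultdict(list))
  let counter_keys : PySem.Dict String (List String) :=
    file_list.foldl (fun d p => d.modify p.1 [] (fun l => l ++ [p.2])) PySem.Dict.empty
  -- sorted(counter_keys.items()) — Python tuple comparison: key first, then value
  let intermediate_list := PySem.List.sorted2 counter_keys.items (fun x => x.1) (fun x => x.2)
  intermediate_list.foldl
    (fun duplicate_list ffi => if ffi.2.length > 1 then duplicate_list ++ [ffi] else duplicate_list) []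

-- ===== PORT B =====
-- the outer while-loop of Source B: each step consumes one equal-key run of the sorted list
def sdGroups : List (String × String) → List (String × List String)
  | [] => []
  | (k, p) :: rest =>
    let run := rest.takeWhile (fun q => q.1 == k)      -- the inner `while j < n and ...` scan
    if run.length + 1 > 1 then                         -- `if j - i > 1`
      (k, p :: run.map (fun q => q.2)) :: sdGroups (rest.dropWhile (fun q => q.1 == k))
    else
      sdGroups (rest.dropWhile (fun q => q.1 == k))
termination_by L => L.length
decreasing_by all_goals
  exact Nat.lt_succ_of_le (List.length_dropWhile_le _ _)

def search_duplicates_alt (file_list : List (String × String)) : List (String × List String) :=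
  sdGroups (PySem.List.sorted file_list (fun pair => pair.1))

-- ===== PRECONDITION & SPEC =====
def Spec_search_duplicates (file_list : List (String × String)) (out : List (String × List String)) : Prop := out = search_duplicates_alt file_list
instance (file_list : List (String × String)) (out : List (String × List String)) : Decidable (Spec_search_duplicates file_list out) := by unfold Spec_search_duplicates; infer_instance

-- ===== CLAIM (what is proved, stated in full; the proofs are below) =====
def Claim_equal_search_duplicates : Prop := ∀ (file_list : List (String × String)), Dom_search_duplicates file_list → Spec_search_duplicates file_list (search_duplicates file_list)

-- ===== LEMMAS AND PROOFS =====

-- both programs equal this canonical form: the distinct keys in sorted order, each paired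
-- with the paths of its key in original order, keeping only groups of more than one path
def sdCanon (fl : List (String × String)) : List (String × List String) :=
  ((PySem.List.sorted (PySem.Set.ofList (fl.map (fun p => p.1))) (fun x => x)).map
      (fun k => (k, (fl.filter (fun p => p.1 == k)).map (fun p => p.2)))).filter
    (fun g => decide (1 < g.2.length))

-- insertBy only compares the inserted element with members of the accumulator
lemma insertBy_congr {α : Type} (c c' : α → α → Bool) (x : α) (ys : List α)
    (h : ∀ y ∈ ys, c x y = c' x y) :
    PySem.List.insertBy c x ys = PySem.List.insertBy c' x ys := by
  induction ys with
  | nil => rfl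
  | cons y ys ih =>
    simp only [PySem.List.insertBy]
    rw [h y (by simp)]
    split
    · rfl
    · rw [ih (fun z hz => h z (by simp [hz]))]

-- an insertion sort is unchanged when the comparator is replaced by one that agrees
-- on all pairs of distinct elements of a duplicate-free carrier
lemma foldl_insertBy_congr {α : Type} (c c' : α → α → Bool) (S : List α)
    (h : ∀ x ∈ S, ∀ y ∈ S, x ≠ y → c x y = c' x y) :
    ∀ (xs acc : List α), (acc ++ xs).Nodup → (∀ a ∈ acc, a ∈ S) → (∀ a ∈ xs, a ∈ S) →
      xs.foldl (fun a x => PySem.List.insertBy c x a) acc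
        = xs.foldl (fun a x => PySem.List.insertBy c' x a) acc := by
  intro xs
  induction xs with
  | nil => intro acc _ _ _; rfl
  | cons x xs ih =>
    intro acc hnd haccS hxsS
    have hxacc : x ∉ acc := by
      intro hx
      exact (List.disjoint_of_nodup_append hnd) hx (by simp)
    have h1 : PySem.List.insertBy c x acc = PySem.List.insertBy c' x acc := by
      apply insertBy_congr
      intro y hy
      exact h x (hxsS x (by simp)) y (haccS y hy) (fun he => hxacc (he ▸ hy))
    simp only [List.foldl_cons]
    rw [h1]
    have hperm : (PySem.List.insertBy c' x acc ++ xs).Perm (acc ++ x :: xs) := by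
      refine ((PySem.List.insertBy_perm c' x acc).append_right xs).trans ?_
      rw [List.cons_append]
      exact List.perm_middle.symm
    refine ih _ (hperm.nodup_iff.mpr hnd) ?_ (fun a ha => hxsS a (by simp [ha]))
    intro a ha
    rcases (PySem.List.mem_insertBy _ _ _ _).mp ha with rfl | ha
    · exact hxsS a (by simp)
    · exact haccS a ha

-- on a list with pairwise-distinct first components, Python's tuple sort is the sort by key
lemma sorted2_eq_sorted_fst (l : List (String × List String))
    (h : (l.map (fun p => p.1)).Nodup) :
    PySem.List.sorted2 l (fun x => x.1) (fun x => x.2) = PySem.List.sorted l (fun x => x.1) := by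
  have hl : l.Nodup := h.of_map _
  have hinj := List.inj_on_of_nodup_map h
  simp only [PySem.List.sorted2, PySem.List.sorted_eq_foldl_insertBy]
  simp only [if_neg (by decide : ¬ (false = true))]
  apply foldl_insertBy_congr _ _ l _ l [] (by simpa) (by simp) (fun a ha => ha)
  intro x hx y hy hne
  have hk : x.1 ≠ y.1 := fun he => hne (hinj hx hy he)
  rcases lt_or_gt_of_ne hk with hlt | hgt
  · simp [hlt, asymm hlt]
  · simp [hgt, asymm hgt]

-- stability, one insertion step
lemma filter_insertBy (k : String) (x : String × String) (ys : List (String × String))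
    (h : ys.Pairwise (fun a b => a.1 ≤ b.1)) :
    (PySem.List.insertBy (fun a b => decide (a.1 < b.1)) x ys).filter (fun q => q.1 == k)
      = ys.filter (fun q => q.1 == k) ++ (if x.1 == k then [x] else []) := by
  induction ys with
  | nil =>
    simp only [PySem.List.insertBy, List.filter_nil, List.nil_append]
    by_cases hxk : (x.1 == k) = true <;> simp [hxk]
  | cons y ys ih =>
    rw [List.pairwise_cons] at h
    simp only [PySem.List.insertBy]
    split
    · rename_i hxy
      rw [decide_eq_true_eq] at hxy
      by_cases hxk : (x.1 == k) = true
      · have hxk' : x.1 = k := by simpa using hxk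
        have hempty : (y :: ys).filter (fun q => q.1 == k) = [] := by
          rw [List.filter_eq_nil_iff]
          intro q hq
          have hk_lt : k < q.1 := by
            rcases List.mem_cons.mp hq with rfl | hq'
            · exact hxk' ▸ hxy
            · exact hxk' ▸ lt_of_lt_of_le hxy (h.1 q hq')
          simpa using (ne_of_gt hk_lt)
        rw [List.filter_cons, hempty]
        simp [hxk]
      · have hxk0 : (x.1 == k) = false := by simpa using hxk
        rw [List.filter_cons]
        simp [hxk0]
    · rw [List.filter_cons, List.filter_cons, ih h.2]
      split <;> simp

lemma filter_foldl_insertBy (k : String) :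
    ∀ (xs acc : List (String × String)), acc.Pairwise (fun a b => a.1 ≤ b.1) →
      (xs.foldl (fun a x => PySem.List.insertBy (fun a b => decide (a.1 < b.1)) x a) acc).filter
          (fun q => q.1 == k)
        = acc.filter (fun q => q.1 == k) ++ xs.filter (fun q => q.1 == k) := by
  intro xs
  induction xs with
  | nil => intro acc _; simp
  | cons x xs ih =>
    intro acc hp
    simp only [List.foldl_cons]
    rw [ih _ (PySem.List.insertBy_pairwise_le (fun p => p.1) x acc hp),
        filter_insertBy k x acc hp, List.filter_cons]
    by_cases hxk : (x.1 == k) = true <;> simp [hxk]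

-- stability: the elements of one key keep their relative order through the sort
lemma sorted_filter_key (xs : List (String × String)) (k : String) :
    (PySem.List.sorted xs (fun p => p.1)).filter (fun q => q.1 == k)
      = xs.filter (fun q => q.1 == k) := by
  rw [PySem.List.sorted_eq_foldl_insertBy]
  simpa using filter_foldl_insertBy k xs [] (by simp)

-- Set.update facts used to peel one key group off the front of the sorted list
lemma update_of_forall_mem {α : Type} [BEq α] [LawfulBEq α] :
    ∀ (xs : List α) (s : PySem.Set α), (∀ x ∈ xs, x ∈ s) → PySem.Set.update s xs = s := by
  intro xs
  induction xs with
  | nil => intro s _; rfl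
  | cons x xs ih =>
    intro s h
    rw [PySem.Set.update_cons]
    have : s.add x = s := by
      simp only [PySem.Set.add]
      rw [if_pos]
      simpa using h x (by simp)
    rw [this]
    exact ih s (fun y hy => h y (by simp [hy]))

lemma update_cons_of_forall_ne {α : Type} [BEq α] [LawfulBEq α] (k : α) :
    ∀ (xs : List α) (s : List α), (∀ x ∈ xs, x ≠ k) →
      PySem.Set.update (k :: s) xs = k :: PySem.Set.update s xs := by
  intro xs
  induction xs with
  | nil => intro s _; rfl
  | cons x xs ih =>
    intro s h
    rw [PySem.Set.update_cons, PySem.Set.update_cons]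
    have hadd : PySem.Set.add (k :: s) x = k :: PySem.Set.add s x := by
      simp only [PySem.Set.add]
      have hxk : x ≠ k := h x (by simp)
      have hck : PySem.Set.contains (k :: s) x = PySem.Set.contains s x := by
        simp only [PySem.Set.contains, List.contains_cons]
        have : (x == k) = false := by simpa using hxk
        simp [this]
      rw [hck]
      split <;> rfl
    rw [hadd]
    exact ih _ (fun y hy => h y (by simp [hy]))

lemma update_sublist {α : Type} [BEq α] :
    ∀ (xs : List α) (s : PySem.Set α), (PySem.Set.update s xs).Sublist (s ++ xs) := by
  intro xs
  induction xs with
  | nil => intro s; simp [PySem.Set.update_nil]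
  | cons x xs ih =>
    intro s
    rw [PySem.Set.update_cons]
    refine (ih (s.add x)).trans ?_
    have : (s.add x).Sublist (s ++ [x]) := by
      simp only [PySem.Set.add]
      split
      · exact (List.sublist_append_left s [x])
      · simp
    simpa using this.append_right xs

lemma ofList_sublist {α : Type} [BEq α] (xs : List α) :
    (PySem.Set.ofList xs).Sublist xs := by
  have := update_sublist xs (PySem.Set.empty)
  simpa [PySem.Set.ofList, PySem.Set.update, PySem.Set.empty] using this

-- after the equal-key run of k is dropped, no element with key k remains
lemma dropWhile_key_ne (k : String) :
    ∀ (l : List (String × String)), l.Pairwise (fun a b => a.1 ≤ b.1) →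
      (∀ q ∈ l, k ≤ q.1) → ∀ q ∈ l.dropWhile (fun q => q.1 == k), q.1 ≠ k := by
  intro l
  induction l with
  | nil => simp
  | cons y ys ih =>
    intro hp hk q hq
    rw [List.dropWhile_cons] at hq
    split at hq
    · exact ih (List.pairwise_cons.mp hp).2 (fun r hr => hk r (by simp [hr])) q hq
    · rename_i hyk
      have hyk' : y.1 ≠ k := by simpa using hyk
      rcases List.mem_cons.mp hq with rfl | hq'
      · exact hyk'
      · have h1 : k < y.1 := lt_of_le_of_ne (hk y (by simp)) (fun he => hyk' he.symm)
        have h2 : y.1 ≤ q.1 := (List.pairwise_cons.mp hp).1 q hq'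
        exact ne_of_gt (lt_of_lt_of_le h1 h2)

-- the characterisation of B's grouping pass on a key-sorted list
lemma sdGroups_eq : ∀ (L : List (String × String)), L.Pairwise (fun a b => a.1 ≤ b.1) →
    sdGroups L = ((PySem.Set.ofList (L.map (fun p => p.1))).map
        (fun k => (k, (L.filter (fun p => p.1 == k)).map (fun p => p.2)))).filter
      (fun g => decide (1 < g.2.length))
  | [] => by intro _; simp [sdGroups, PySem.Set.ofList, PySem.Set.empty]
  | (k, p) :: rest => by
    intro h
    rw [List.pairwise_cons] at h
    have hk_le : ∀ q ∈ rest, k ≤ q.1 := fun q hq => h.1 q hq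
    have hsplit : rest.takeWhile (fun q => q.1 == k) ++ rest.dropWhile (fun q => q.1 == k)
        = rest := List.takeWhile_append_dropWhile
    have hrunk : ∀ q ∈ rest.takeWhile (fun q => q.1 == k), q.1 = k := by
      intro q hq
      simpa using List.mem_takeWhile_imp hq
    have hpair' : (rest.dropWhile (fun q => q.1 == k)).Pairwise (fun a b => a.1 ≤ b.1) :=
      h.2.sublist (List.dropWhile_sublist _)
    have hne : ∀ q ∈ rest.dropWhile (fun q => q.1 == k), q.1 ≠ k :=
      dropWhile_key_ne k rest h.2 hk_le
    have hKS : PySem.Set.ofList (((k, p) :: rest).map (fun q => q.1))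
        = k :: PySem.Set.ofList ((rest.dropWhile (fun q => q.1 == k)).map (fun q => q.1)) := by
      have h0 : PySem.Set.ofList (k :: rest.map (fun q => q.1))
          = PySem.Set.update [k] (rest.map (fun q => q.1)) := rfl
      rw [List.map_cons, h0]
      conv_lhs => rw [← hsplit]
      rw [List.map_append, PySem.Set.update_append]
      rw [update_of_forall_mem _ [k]
            (by intro x hx; rcases List.mem_map.mp hx with ⟨q, hq, rfl⟩; simp [hrunk q hq])]
      rw [update_cons_of_forall_ne k _ []
            (by intro x hx; rcases List.mem_map.mp hx with ⟨q, hq, rfl⟩; exact hne q hq)]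
      rw [PySem.Set.update_nil_left]
    have hF1 : ((k, p) :: rest).filter (fun q => q.1 == k)
        = (k, p) :: rest.takeWhile (fun q => q.1 == k) := by
      rw [List.filter_cons]
      simp only [beq_self_eq_true, if_pos]
      conv_lhs => rw [← hsplit]
      rw [List.filter_append]
      rw [List.filter_eq_self.mpr (by intro q hq; simpa using hrunk q hq)]
      rw [List.filter_eq_nil_iff.mpr (by intro q hq; simpa using hne q hq)]
      simp
    have hF2 : ∀ k' ∈ PySem.Set.ofList ((rest.dropWhile (fun q => q.1 == k)).map (fun q => q.1)),
        ((k, p) :: rest).filter (fun q => q.1 == k')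
          = (rest.dropWhile (fun q => q.1 == k)).filter (fun q => q.1 == k') := by
      intro k' hk'
      have hk'mem : k' ∈ (rest.dropWhile (fun q => q.1 == k)).map (fun q => q.1) :=
        (PySem.Set.mem_ofList _ _).mp hk'
      rcases List.mem_map.mp hk'mem with ⟨q0, hq0, rfl⟩
      have hkk' : k ≠ q0.1 := fun he => hne q0 hq0 he.symm
      rw [List.filter_cons]
      rw [if_neg (by simpa using hkk')]
      conv_lhs => rw [← hsplit]
      rw [List.filter_append]
      rw [List.filter_eq_nil_iff.mpr (by intro q hq; simp [hrunk q hq]; exact hkk')]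
      simp
    have hmap : ((rest.dropWhile (fun q => q.1 == k)).map (fun q => q.1) |> PySem.Set.ofList).map
          (fun k' => (k', (((k, p) :: rest).filter (fun q => q.1 == k')).map (fun q => q.2)))
        = ((rest.dropWhile (fun q => q.1 == k)).map (fun q => q.1) |> PySem.Set.ofList).map
          (fun k' => (k', ((rest.dropWhile (fun q => q.1 == k)).filter
              (fun q => q.1 == k')).map (fun q => q.2))) :=
      List.map_congr_left (fun k' hk' => by rw [hF2 k' hk'])
    rw [hKS, List.map_cons, hF1, hmap, List.filter_cons]
    have hrec := sdGroups_eq (rest.dropWhile (fun q => q.1 == k)) hpair'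
    show sdGroups ((k, p) :: rest) = _
    rw [sdGroups]
    by_cases hlen : (rest.takeWhile (fun q => q.1 == k)).length + 1 > 1
    · rw [if_pos hlen, if_pos (by simpa using hlen), hrec]
      simp
    · rw [if_neg hlen, if_neg (by simpa using hlen), hrec]
termination_by L => L.length
decreasing_by
  exact Nat.lt_succ_of_le (List.length_dropWhile_le _ _)

lemma A_eq_canon (fl : List (String × String)) : search_duplicates fl = sdCanon fl := by
  simp only [search_duplicates]
  have hkeys : (fl.foldl (fun d p => d.modify p.1 [] (fun l => l ++ [p.2]))
      (PySem.Dict.empty : PySem.Dict String (List String))).keys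
      = PySem.Set.ofList (fl.map (fun p => p.1)) := by
    rw [PySem.Dict.keys_foldl_modify_key fl (fun p : String × String => p.1) []
        (fun d x => fun l => l ++ [x.2]) PySem.Dict.empty]
    rw [show (PySem.Dict.empty : PySem.Dict String (List String)).keys = [] from rfl,
        PySem.Set.update_nil_left]
  have hnodup : (fl.foldl (fun d p => d.modify p.1 [] (fun l => l ++ [p.2]))
      (PySem.Dict.empty : PySem.Dict String (List String))).keys.Nodup :=
    PySem.Dict.nodup_keys_foldl_modify_key fl (fun p : String × String => p.1) []
      (fun d x => fun l => l ++ [x.2]) PySem.Dict.empty (by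
        rw [show (PySem.Dict.empty : PySem.Dict String (List String)).keys = [] from rfl]; simp)
  have hgetD : ∀ k, (fl.foldl (fun d p => d.modify p.1 [] (fun l => l ++ [p.2]))
      (PySem.Dict.empty : PySem.Dict String (List String))).getD k []
      = (fl.filter (fun p => p.1 == k)).map (fun p => p.2) := by
    intro k
    rw [PySem.Dict.getD_foldl_modify_append fl PySem.Dict.empty k]
    rw [show (PySem.Dict.empty : PySem.Dict String (List String)).getD k [] = [] from rfl]
    simp
  have hitems : (fl.foldl (fun d p => d.modify p.1 [] (fun l => l ++ [p.2]))
      (PySem.Dict.empty : PySem.Dict String (List String))).items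
      = (PySem.Set.ofList (fl.map (fun p => p.1))).map
          (fun k => (k, (fl.filter (fun p => p.1 == k)).map (fun p => p.2))) := by
    rw [PySem.Dict.items_eq_map_keys _ hnodup [], hkeys]
    exact List.map_congr_left (fun k _ => by rw [hgetD k])
  have hnodupfst : ((fl.foldl (fun d p => d.modify p.1 [] (fun l => l ++ [p.2]))
      (PySem.Dict.empty : PySem.Dict String (List String))).items.map (fun p => p.1)).Nodup := by
    rw [hitems, List.map_map]
    have hid : ((fun p : String × List String => p.1) ∘
        (fun k => (k, (fl.filter (fun p => p.1 == k)).map (fun p => p.2)))) = id := by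
      funext k; rfl
    rw [hid, List.map_id]
    exact PySem.Set.nodup_ofList _
  rw [sorted2_eq_sorted_fst _ hnodupfst]
  have hsorted : PySem.List.sorted (fl.foldl (fun d p => d.modify p.1 [] (fun l => l ++ [p.2]))
      (PySem.Dict.empty : PySem.Dict String (List String))).items (fun x => x.1)
      = (PySem.List.sorted (PySem.Set.ofList (fl.map (fun p => p.1))) (fun x => x)).map
          (fun k => (k, (fl.filter (fun p => p.1 == k)).map (fun p => p.2))) := by
    apply PySem.List.sorted_eq_of_perm_of_pairwise_lt
    · rw [hitems]
      exact (PySem.List.sorted_perm _ _ false).map _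
    · rw [List.pairwise_map]
      simpa using PySem.List.sorted_ofList_pairwise_lt (fl.map (fun p => p.1))
  rw [hsorted]
  have hfun : (fun (dl : List (String × List String)) ffi =>
        if ffi.2.length > 1 then dl ++ [ffi] else dl)
      = (fun dl ffi => if (decide (1 < ffi.2.length)) = true then dl ++ [id ffi] else dl) := by
    funext dl ffi
    simp
  rw [hfun, PySem.List.foldl_append_if]
  simp [sdCanon]

lemma B_eq_canon (fl : List (String × String)) : search_duplicates_alt fl = sdCanon fl := by
  simp only [search_duplicates_alt]
  rw [sdGroups_eq _ (PySem.List.sorted_pairwise fl (fun pair => pair.1))]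
  have hmemL : ∀ a : String, a ∈ (PySem.List.sorted fl (fun pair => pair.1)).map (fun p => p.1)
      ↔ a ∈ fl.map (fun p => p.1) := by
    intro a
    exact ((PySem.List.sorted_perm fl (fun pair => pair.1) false).map (fun p => p.1)).mem_iff
  have hkeys : PySem.Set.ofList ((PySem.List.sorted fl (fun pair => pair.1)).map (fun p => p.1))
      = PySem.List.sorted (PySem.Set.ofList (fl.map (fun p => p.1))) (fun x => x) := by
    refine (PySem.List.sorted_eq_of_perm_of_pairwise_lt _ _ (fun x => x) ?_ ?_).symm
    · rw [List.perm_ext_iff_of_nodup (PySem.Set.nodup_ofList _) (PySem.Set.nodup_ofList _)]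
      intro a
      rw [PySem.Set.mem_ofList, PySem.Set.mem_ofList]
      exact hmemL a
    · have hle : ((PySem.List.sorted fl (fun pair => pair.1)).map (fun p => p.1)).Pairwise
          (fun a b => a ≤ b) := by
        rw [List.pairwise_map]
        exact PySem.List.sorted_pairwise fl (fun pair => pair.1)
      have hle' := hle.sublist (ofList_sublist _)
      have hne := PySem.Set.nodup_ofList
        ((PySem.List.sorted fl (fun pair => pair.1)).map (fun p => p.1))
      exact (hle'.and hne).imp (fun hab => lt_of_le_of_ne hab.1 hab.2)
  rw [hkeys]
  unfold sdCanon
  congr 1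
  apply List.map_congr_left
  intro k _
  rw [sorted_filter_key fl k]

-- ===== VERDICT (by name: the statement is the Claim_ definition above) =====
theorem search_duplicates_spec : Claim_equal_search_duplicates := by
  intro fl _
  show search_duplicates fl = search_duplicates_alt fl
  rw [A_eq_canon, B_eq_canon]
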